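-- pv_equiv track=rewrite | github.com/santha22/PythonPrograms | GFG/boundaryTraversalMatrix.py | BoundaryTraversal
-- ===== SOURCE A (Python) =====
-- def BoundaryTraversal(matrix, n, m):
--     # code here
--     left = 0
--     right = m - 1
--     up = 0
--     down = n - 1
--     ans = []
--
--     if n == 1:
--         for i in range(m):
--             ans.append(matrix[0][i])
--
--         return ans
--
--     if m == 1:
--         for j in range(n):
--             ans.append(matrix[j][0])
--
--         return ans
--
--     for i in range(right + 1):
--         ans.append(matrix[left][i])
--
--     for j in range(up + 1, down + 1):
--         ans.append(matrix[j][right])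
--
--     for k in range(right - 1, left - 1, -1):
--         ans.append(matrix[down][k])
--
--     for l in range(down - 1, up, -1):
--         ans.append(matrix[l][left])
--
--     return ans
-- ===== SOURCE B (Python) =====
-- def BoundaryTraversal(matrix, n, m):
--     if n == 1:
--         return [matrix[0][i] for i in range(m)]
--     if m == 1:
--         return [matrix[j][0] for j in range(n)]
--     ans = []
--     r, c, dr, dc = 0, 0, 0, 1
--     for _ in range(2 * (n + m) - 4):
--         ans.append(matrix[r][c])
--         if not (0 <= r + dr < n and 0 <= c + dc < m):
--             dr, dc = dc, -dr
--         r, c = r + dr, c + dc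
--     return ans
-- ===== Notes on version B (the rewrite author's own statement) =====
-- stated objective: alternative
-- what changed: Replaces the four directional range-loops of the general case by a single perimeter walk that threads a position and a direction vector through one loop, rotating the direction clockwise whenever the next step would leave the matrix, stopping after exactly 2n+2m-4 cells.
-- outside the precondition, e.g. on BoundaryTraversal([[1, 2], [3, 4]], 2, 0): A returns [4], B returns []; on BoundaryTraversal([[1, 2, 3], [4, 5, 6]], 0, 3): A returns [1, 2, 3, 5, 4], B returns [1, 4]
import Mathlib
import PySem

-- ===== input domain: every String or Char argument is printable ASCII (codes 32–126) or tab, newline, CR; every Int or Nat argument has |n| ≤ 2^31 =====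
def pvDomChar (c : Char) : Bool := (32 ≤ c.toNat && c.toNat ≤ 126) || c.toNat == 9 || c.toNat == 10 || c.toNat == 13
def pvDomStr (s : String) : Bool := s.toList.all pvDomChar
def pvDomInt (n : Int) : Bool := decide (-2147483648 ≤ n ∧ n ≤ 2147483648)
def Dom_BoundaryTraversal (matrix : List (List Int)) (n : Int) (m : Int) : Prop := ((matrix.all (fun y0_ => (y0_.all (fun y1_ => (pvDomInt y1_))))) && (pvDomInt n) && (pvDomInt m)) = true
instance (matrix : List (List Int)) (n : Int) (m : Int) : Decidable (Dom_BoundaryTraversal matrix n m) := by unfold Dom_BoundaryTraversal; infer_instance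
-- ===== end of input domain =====

-- B replaces A's four directional range-loops by one perimeter walk threading position + direction
-- state (objective: alternative decomposition, same cost); equivalence proved on well-formed inputs.

-- matrix[r][c]  (pyGetD is exact under Pre_, which keeps every read index in range)
def pvCell (matrix : List (List Int)) (r c : Int) : Int :=
  PySem.List.pyGetD (PySem.List.pyGetD matrix r []) c 0

-- ===== PORT A =====
def BoundaryTraversal (matrix : List (List Int)) (n : Int) (m : Int) : List Int :=
  let left : Int := 0
  let right : Int := m - 1
  let up : Int := 0
  let down : Int := n - 1
  let ans : List Int := []
  if n = 1 then
    (PySem.List.pyRange 0 m 1).foldl (fun a i => a ++ [pvCell matrix 0 i]) ans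
  else if m = 1 then
    (PySem.List.pyRange 0 n 1).foldl (fun a j => a ++ [pvCell matrix j 0]) ans
  else
    let ans1 := (PySem.List.pyRange 0 (right + 1) 1).foldl (fun a i => a ++ [pvCell matrix left i]) ans
    let ans2 := (PySem.List.pyRange (up + 1) (down + 1) 1).foldl (fun a j => a ++ [pvCell matrix j right]) ans1
    let ans3 := (PySem.List.pyRange (right - 1) (left - 1) (-1)).foldl (fun a k => a ++ [pvCell matrix down k]) ans2
    (PySem.List.pyRange (down - 1) up (-1)).foldl (fun a l => a ++ [pvCell matrix l left]) ans3

-- ===== PORT B =====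
-- the perimeter walk: each iteration appends matrix[r][c], turns clockwise if the next
-- step would leave the matrix, then moves; fuel = number of remaining iterations
def pvWalk (matrix : List (List Int)) (n m : Int) : Nat → Int → Int → Int → Int → List Int → List Int
  | 0, _, _, _, _, ans => ans
  | fuel + 1, r, c, dr, dc, ans =>
    let ans2 := ans ++ [pvCell matrix r c]
    if 0 ≤ r + dr ∧ r + dr < n ∧ 0 ≤ c + dc ∧ c + dc < m then
      pvWalk matrix n m fuel (r + dr) (c + dc) dr dc ans2
    else
      pvWalk matrix n m fuel (r + dc) (c + (-dr)) dc (-dr) ans2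

def BoundaryTraversal_alt (matrix : List (List Int)) (n : Int) (m : Int) : List Int :=
  if n = 1 then
    (PySem.List.pyRange 0 m 1).map (fun i => pvCell matrix 0 i)
  else if m = 1 then
    (PySem.List.pyRange 0 n 1).map (fun j => pvCell matrix j 0)
  else
    pvWalk matrix n m (2 * (n + m) - 4).toNat 0 0 0 1 []

-- ===== PRECONDITION & SPEC =====
-- Pre_ excludes ill-shaped matrices on which A raises IndexError, and the mixed-sign region
-- (n ≥ 2 with m ≤ 0, or n ≤ 0 with m ≥ 2, outside the early branches) where A assembles a
-- value by accidental negative-index wraparound.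
def Pre_BoundaryTraversal (matrix : List (List Int)) (n : Int) (m : Int) : Prop :=
  if n = 1 then
    m ≤ 0 ∨ (0 < matrix.length ∧ m ≤ ((matrix.headD []).length : Int))
  else if m = 1 then
    n ≤ 0 ∨ (n ≤ (matrix.length : Int) ∧ ∀ row ∈ matrix.take n.toNat, 1 ≤ (row.length : Int))
  else if n ≤ 0 ∧ m ≤ 0 then
    True
  else
    1 ≤ n ∧ 1 ≤ m ∧ n ≤ (matrix.length : Int) ∧ ∀ row ∈ matrix.take n.toNat, m ≤ (row.length : Int)

instance (matrix : List (List Int)) (n : Int) (m : Int) : Decidable (Pre_BoundaryTraversal matrix n m) := by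
  unfold Pre_BoundaryTraversal; infer_instance

def pvWitness_BoundaryTraversal : List (List Int) × Int × Int := ([[1, 2, 3], [4, 5, 6], [7, 8, 9]], 3, 3)

def Spec_BoundaryTraversal (matrix : List (List Int)) (n : Int) (m : Int) (out : List Int) : Prop := out = BoundaryTraversal_alt matrix n m
instance (matrix : List (List Int)) (n : Int) (m : Int) (out : List Int) : Decidable (Spec_BoundaryTraversal matrix n m out) := by unfold Spec_BoundaryTraversal; infer_instance

-- ===== CLAIM (what is proved, stated in full; the proofs are below) =====
def Claim_equal_BoundaryTraversal : Prop := ∀ (matrix : List (List Int)) (n : Int) (m : Int), Dom_BoundaryTraversal matrix n m → Pre_BoundaryTraversal matrix n m → Spec_BoundaryTraversal matrix n m (BoundaryTraversal matrix n m)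

-- ===== LEMMAS AND PROOFS =====

theorem pvWalk_succ (matrix : List (List Int)) (n m : Int) (fuel : Nat) (r c dr dc : Int) (ans : List Int) :
    pvWalk matrix n m (fuel + 1) r c dr dc ans =
      if 0 ≤ r + dr ∧ r + dr < n ∧ 0 ≤ c + dc ∧ c + dc < m then
        pvWalk matrix n m fuel (r + dr) (c + dc) dr dc (ans ++ [pvCell matrix r c])
      else
        pvWalk matrix n m fuel (r + dc) (c + (-dr)) dc (-dr) (ans ++ [pvCell matrix r c]) := rfl

-- phase 1: walking right along row 0 from column c = m-1-k consumes k+1 fuel, emits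
-- row-0 cells c..m-1 and leaves the walk at (1, m-1) heading down
theorem pvWalkR (matrix : List (List Int)) (n m : Int) (hn : 1 ≤ n) :
    ∀ (k : Nat) (rest : Nat) (c : Int) (acc : List Int), c = m - 1 - (k : Int) → (k : Int) ≤ m - 1 →
      pvWalk matrix n m (k + 1 + rest) 0 c 0 1 acc =
        pvWalk matrix n m rest 1 (m - 1) 1 0
          (acc ++ (PySem.List.pyRange c m 1).map (fun i => pvCell matrix 0 i)) := by
  intro k
  induction k with
  | zero =>
    intro rest c acc hc hk
    have h1 : (0 : Nat) + 1 + rest = rest + 1 := by omega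
    rw [h1, pvWalk_succ, if_neg (by omega)]
    have hr : PySem.List.pyRange c m 1 = c :: PySem.List.pyRange (c + 1) m 1 :=
      PySem.List.pyRange_one_cons (by omega)
    rw [hr, PySem.List.pyRange_one_eq_nil (by omega)]
    norm_num
    congr 1 <;> omega
  | succ k ih =>
    intro rest c acc hc hk
    have h1 : (k + 1) + 1 + rest = (k + 1 + rest) + 1 := by omega
    push_cast at hc hk
    rw [h1, pvWalk_succ, if_pos (by omega)]
    simp only [add_zero]
    rw [ih rest (c + 1) (acc ++ [pvCell matrix 0 c]) (by omega) (by omega)]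
    have hr : PySem.List.pyRange c m 1 = c :: PySem.List.pyRange (c + 1) m 1 :=
      PySem.List.pyRange_one_cons (by omega)
    rw [hr]
    norm_num

-- phase 2: walking down along column m-1 from row r = n-1-k consumes k+1 fuel, emits
-- the column cells of rows r..n-1 and leaves the walk at (n-1, m-2) heading left
theorem pvWalkD (matrix : List (List Int)) (n m : Int) (hm : 1 ≤ m) :
    ∀ (k : Nat) (rest : Nat) (r : Int) (acc : List Int), r = n - 1 - (k : Int) → (k : Int) ≤ n - 1 →
      pvWalk matrix n m (k + 1 + rest) r (m - 1) 1 0 acc =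
        pvWalk matrix n m rest (n - 1) (m - 2) 0 (-1)
          (acc ++ (PySem.List.pyRange r n 1).map (fun j => pvCell matrix j (m - 1))) := by
  intro k
  induction k with
  | zero =>
    intro rest r acc hr hk
    have h1 : (0 : Nat) + 1 + rest = rest + 1 := by omega
    rw [h1, pvWalk_succ, if_neg (by omega)]
    have hcons : PySem.List.pyRange r n 1 = r :: PySem.List.pyRange (r + 1) n 1 :=
      PySem.List.pyRange_one_cons (by omega)
    rw [hcons, PySem.List.pyRange_one_eq_nil (by omega)]
    norm_num
    congr 1 <;> omega
  | succ k ih =>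
    intro rest r acc hr hk
    have h1 : (k + 1) + 1 + rest = (k + 1 + rest) + 1 := by omega
    push_cast at hr hk
    rw [h1, pvWalk_succ, if_pos (by omega)]
    simp only [add_zero]
    rw [ih rest (r + 1) (acc ++ [pvCell matrix r (m - 1)]) (by omega) (by omega)]
    have hcons : PySem.List.pyRange r n 1 = r :: PySem.List.pyRange (r + 1) n 1 :=
      PySem.List.pyRange_one_cons (by omega)
    rw [hcons]
    norm_num

-- phase 3: walking left along row n-1 from column c = k consumes k+1 fuel, emits
-- the bottom-row cells c, c-1, …, 0 and leaves the walk at (n-2, 0) heading up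
theorem pvWalkL (matrix : List (List Int)) (n m : Int) (hn : 1 ≤ n) :
    ∀ (k : Nat) (rest : Nat) (c : Int) (acc : List Int), c = (k : Int) → (k : Int) ≤ m - 1 →
      pvWalk matrix n m (k + 1 + rest) (n - 1) c 0 (-1) acc =
        pvWalk matrix n m rest (n - 2) 0 (-1) 0
          (acc ++ (PySem.List.pyRange c (-1) (-1)).map (fun c' => pvCell matrix (n - 1) c')) := by
  intro k
  induction k with
  | zero =>
    intro rest c acc hc hk
    have h1 : (0 : Nat) + 1 + rest = rest + 1 := by omega
    rw [h1, pvWalk_succ, if_neg (by omega)]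
    have hcons : PySem.List.pyRange c (-1) (-1) = c :: PySem.List.pyRange (c - 1) (-1) (-1) :=
      PySem.List.pyRange_neg_one_cons (by omega)
    rw [hcons, PySem.List.pyRange_neg_one_eq_nil (by omega)]
    norm_num
    congr 1 <;> omega
  | succ k ih =>
    intro rest c acc hc hk
    have h1 : (k + 1) + 1 + rest = (k + 1 + rest) + 1 := by omega
    push_cast at hc hk
    rw [h1, pvWalk_succ, if_pos (by omega)]
    simp only [add_zero]
    have harg : c + -1 = c - 1 := by omega
    rw [harg, ih rest (c - 1) (acc ++ [pvCell matrix (n - 1) c]) (by omega) (by omega)]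
    have hcons : PySem.List.pyRange c (-1) (-1) = c :: PySem.List.pyRange (c - 1) (-1) (-1) :=
      PySem.List.pyRange_neg_one_cons (by omega)
    rw [hcons]
    norm_num

-- phase 4: walking up along column 0 from row r = k consumes the last k fuel and emits rows k, …, 1
theorem pvWalkU (matrix : List (List Int)) (n m : Int) (hm : 1 ≤ m) :
    ∀ (k : Nat) (r : Int) (acc : List Int), r = (k : Int) → (k : Int) ≤ n - 2 →
      pvWalk matrix n m k r 0 (-1) 0 acc =
        acc ++ (PySem.List.pyRange r 0 (-1)).map (fun j => pvCell matrix j 0) := by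
  intro k
  induction k with
  | zero =>
    intro r acc hr hk
    subst hr
    rw [PySem.List.pyRange_neg_one_eq_nil (by omega)]
    simp [pvWalk]
  | succ k ih =>
    intro r acc hr hk
    push_cast at hr hk
    rw [show k + 1 = k + 1 from rfl, pvWalk_succ, if_pos (by omega)]
    simp only [add_zero]
    have harg : r + -1 = r - 1 := by omega
    rw [harg, ih (r - 1) (acc ++ [pvCell matrix r 0]) (by omega) (by omega)]
    have hcons : PySem.List.pyRange r 0 (-1) = r :: PySem.List.pyRange (r - 1) 0 (-1) :=
      PySem.List.pyRange_neg_one_cons (by omega)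
    rw [hcons]
    norm_num

-- ===== VERDICT (by name: the statement is the Claim_ definition above) =====
theorem BoundaryTraversal_spec : Claim_equal_BoundaryTraversal := by
  intro matrix n m _ hpre
  unfold Spec_BoundaryTraversal BoundaryTraversal BoundaryTraversal_alt
  by_cases h1 : n = 1
  · simp only [if_pos h1, PySem.List.foldl_append_singleton_eq_map, List.nil_append]
  · rw [if_neg h1, if_neg h1]
    by_cases h2 : m = 1
    · simp only [if_pos h2, PySem.List.foldl_append_singleton_eq_map, List.nil_append]
    · rw [if_neg h2, if_neg h2]
      unfold Pre_BoundaryTraversal at hpre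
      rw [if_neg h1, if_neg h2] at hpre
      by_cases h3 : n ≤ 0 ∧ m ≤ 0
      · -- both non-positive: every directional range of A is empty and B's fuel is 0
        simp only [PySem.List.pyRange_one_eq_nil (show m - 1 + 1 ≤ 0 by omega),
          PySem.List.pyRange_one_eq_nil (show n - 1 + 1 ≤ 0 + 1 by omega),
          PySem.List.pyRange_neg_one_eq_nil (show m - 1 - 1 ≤ 0 - 1 by omega),
          PySem.List.pyRange_neg_one_eq_nil (show n - 1 - 1 ≤ (0 : Int) by omega),
          List.foldl_nil, show (2 * (n + m) - 4).toNat = 0 by omega, pvWalk]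
      · rw [if_neg h3] at hpre
        obtain ⟨hn, hm, -, -⟩ := hpre
        have hn2 : 2 ≤ n := by omega
        have hm2 : 2 ≤ m := by omega
        have ha : ((n.toNat : Int)) = n := by omega
        have hb : ((m.toNat : Int)) = m := by omega
        have hfuel : (2 * (n + m) - 4).toNat =
            (m.toNat - 1) + 1 + ((n.toNat - 2) + 1 + ((m.toNat - 2) + 1 + (n.toNat - 2))) := by omega
        rw [hfuel]
        rw [pvWalkR matrix n m (by omega) (m.toNat - 1) _ 0 [] (by omega) (by omega)]
        rw [pvWalkD matrix n m (by omega) (n.toNat - 2) _ 1 _ (by omega) (by omega)]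
        rw [pvWalkL matrix n m (by omega) (m.toNat - 2) _ (m - 2) _ (by omega) (by omega)]
        rw [pvWalkU matrix n m (by omega) (n.toNat - 2) (n - 2) _ (by omega) (by omega)]
        simp only [PySem.List.foldl_append_singleton_eq_map, List.nil_append, List.append_assoc]
        rw [show m - 1 + 1 = m from by omega, show (0 : Int) + 1 = 1 from by omega,
            show n - 1 + 1 = n from by omega, show m - 1 - 1 = m - 2 from by omega,
            show (0 : Int) - 1 = -1 from by omega, show n - 1 - 1 = n - 2 from by omega]
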